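-- pv_equiv track=rewrite | github.com/petercollingridge/code-for-blog | language/vowel_variants.py | get_words_with_variants_at_each_position
-- ===== SOURCE A (Python) =====
-- from string import ascii_lowercase
--
-- def get_words_with_variants_at_each_position(words):
--     variants = dict()
--
--     for word in words:
--         all_word_lists = []
--
--         for index, letter in enumerate(word):
--             word_list = []
--
--             for new_letter in ascii_lowercase:
--                 if new_letter != letter:
--                     new_word = word[:index] + new_letter + word[index + 1:]
--                     if new_word in words:
--                         word_list.append(new_word)
--
--             if word_list:
--                 all_word_lists.append(word_list)
--             else:
--                 break
--
--         if len(all_word_lists) == len(word):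
--             variants[word] = all_word_lists
--
--     return variants
-- ===== SOURCE B (Python) =====
-- from string import ascii_lowercase
--
-- def get_words_with_variants_at_each_position(words):
--     # Index every word once under wildcard keys (position, prefix, suffix),
--     # recording the (lowercase) letter at that position.
--     patterns = {}
--     for w in words:
--         for i, ch in enumerate(w):
--             if 'a' <= ch <= 'z':
--                 patterns.setdefault((i, w[:i], w[i + 1:]), []).append(ch)
--
--     variants = {}
--     for word in words:
--         all_word_lists = []
--         for i, ch in enumerate(word):
--             bucket = patterns.get((i, word[:i], word[i + 1:]), [])
--             word_list = [word[:i] + c + word[i + 1:]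
--                          for c in sorted(set(bucket)) if c != ch]
--             if not word_list:
--                 break
--             all_word_lists.append(word_list)
--         if len(all_word_lists) == len(word):
--             variants[word] = all_word_lists
--     return variants
-- ===== Notes on version B (the rewrite author's own statement) =====
-- stated objective: faster
-- what changed: B builds a wildcard-pattern index (position, prefix, suffix) -> letters in one pass over the words and answers each position by a dictionary lookup plus sort, instead of A's generating 26 candidate words per position and testing each by scanning the whole words list.
import Mathlib
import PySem

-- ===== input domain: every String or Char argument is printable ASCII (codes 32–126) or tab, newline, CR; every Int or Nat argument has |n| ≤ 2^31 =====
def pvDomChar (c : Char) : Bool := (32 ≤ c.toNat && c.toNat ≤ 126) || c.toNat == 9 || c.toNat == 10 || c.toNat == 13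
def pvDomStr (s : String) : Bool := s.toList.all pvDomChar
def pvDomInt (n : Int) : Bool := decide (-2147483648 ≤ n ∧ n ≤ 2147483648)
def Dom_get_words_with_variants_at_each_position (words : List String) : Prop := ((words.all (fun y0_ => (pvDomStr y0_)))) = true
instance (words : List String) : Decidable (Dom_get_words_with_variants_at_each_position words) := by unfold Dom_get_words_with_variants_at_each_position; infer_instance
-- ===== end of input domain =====

-- B replaces A's per-position generation of 26 candidate words each tested by scanning `words`
-- with a wildcard index (position, prefix, suffix) → letters built in one pass; objective: faster.
-- Strings are handled on their code-point lists (String.toList), exact for Python string slicing/equality.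

-- ===== PORT A =====
-- string.ascii_lowercase
def pvAscii : List Char :=
  ['a','b','c','d','e','f','g','h','i','j','k','l','m','n','o','p','q','r','s','t','u','v','w','x','y','z']

-- word[:i] + c + word[i+1:]  (both Pythons form this same expression)
def pvNew (w : List Char) (i : Nat) (c : Char) : List Char :=
  PySem.List.slice w none (some (i : Int)) ++ [c] ++ PySem.List.slice w (some ((i : Int) + 1)) none

-- A's inner loop over ascii_lowercase: `if new_letter != letter: … if new_word in words: append`
-- (string equality `new_word in words` is tested on code points — exact)
def pvWordListA (words : List String) (w : List Char) (i : Nat) (letter : Char) : List String :=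
  pvAscii.foldl (fun acc c =>
    if c ≠ letter then
      (if words.any (fun v => v.toList == pvNew w i c) then acc ++ [String.ofList (pvNew w i c)] else acc)
    else acc) []

-- A's `for index, letter in enumerate(word)` with the `break` on an empty word_list
def pvCollectA (words : List String) (w : List Char) : List (Char × Nat) → List (List String) → List (List String)
  | [], acc => acc
  | p :: rest, acc =>
    let wl := pvWordListA words w p.2 p.1
    if wl = [] then acc else pvCollectA words w rest (acc ++ [wl])

def get_words_with_variants_at_each_position (words : List String) : List (String × List (List String)) :=
  (words.foldl (fun (d : PySem.Dict String (List (List String))) word =>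
      let awl := pvCollectA words word.toList word.toList.zipIdx []
      if awl.length = word.toList.length then d.insert word awl else d)
    PySem.Dict.empty).items

-- ===== PORT B =====
-- 'a' <= ch <= 'z'
def pvGuard (c : Char) : Bool := decide ('a' ≤ c) && decide (c ≤ 'z')

-- the wildcard key (i, w[:i], w[i+1:])
def pvKey (w : List Char) (i : Nat) : Nat × List Char × List Char :=
  (i, PySem.List.slice w none (some (i : Int)), PySem.List.slice w (some ((i : Int) + 1)) none)

-- patterns: for w in words: for i, ch in enumerate(w): if lowercase: setdefault(key, []).append(ch)
def pvPatterns (words : List String) : PySem.Dict (Nat × List Char × List Char) (List Char) :=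
  words.foldl (fun d word =>
    word.toList.zipIdx.foldl (fun d p =>
      if pvGuard p.1 then d.modify (pvKey word.toList p.2) [] (· ++ [p.1]) else d) d)
    PySem.Dict.empty

-- [word[:i] + c + word[i+1:] for c in sorted(set(bucket)) if c != ch]
def pvWordListB (pat : PySem.Dict (Nat × List Char × List Char) (List Char))
    (w : List Char) (i : Nat) (letter : Char) : List String :=
  let bucket := pat.getD (pvKey w i) []
  (PySem.List.sorted (PySem.Set.ofList bucket) (fun c => c)).foldl
    (fun acc c => if c ≠ letter then acc ++ [String.ofList (pvNew w i c)] else acc) []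

-- B's enumerate loop with the same break
def pvCollectB (pat : PySem.Dict (Nat × List Char × List Char) (List Char))
    (w : List Char) : List (Char × Nat) → List (List String) → List (List String)
  | [], acc => acc
  | p :: rest, acc =>
    let wl := pvWordListB pat w p.2 p.1
    if wl = [] then acc else pvCollectB pat w rest (acc ++ [wl])

def get_words_with_variants_at_each_position_alt (words : List String) : List (String × List (List String)) :=
  let pat := pvPatterns words
  (words.foldl (fun (d : PySem.Dict String (List (List String))) word =>
      let awl := pvCollectB pat word.toList word.toList.zipIdx []
      if awl.length = word.toList.length then d.insert word awl else d)
    PySem.Dict.empty).items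

-- ===== PRECONDITION & SPEC =====
def Spec_get_words_with_variants_at_each_position (words : List String) (out : List (String × List (List String))) : Prop := out = get_words_with_variants_at_each_position_alt words
instance (words : List String) (out : List (String × List (List String))) : Decidable (Spec_get_words_with_variants_at_each_position words out) := by unfold Spec_get_words_with_variants_at_each_position; infer_instance

-- ===== CLAIM (what is proved, stated in full; the proofs are below) =====
def Claim_equal_get_words_with_variants_at_each_position : Prop := ∀ (words : List String), Dom_get_words_with_variants_at_each_position words → Spec_get_words_with_variants_at_each_position words (get_words_with_variants_at_each_position words)

-- ===== LEMMAS AND PROOFS =====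

-- the (key, letter) pairs the index loop inserts, flattened
def pvPairs (words : List String) : List ((Nat × List Char × List Char) × Char) :=
  words.flatMap (fun word =>
    (word.toList.zipIdx.filter (fun p => pvGuard p.1)).map (fun p => (pvKey word.toList p.2, p.1)))

theorem pvKey_eq (w : List Char) (i : Nat) : pvKey w i = (i, w.take i, w.drop (i + 1)) := by
  have h1 : ((i : Int)).toNat = i := by omega
  have h2 : ((i : Int) + 1).toNat = i + 1 := by omega
  unfold pvKey
  rw [PySem.List.slice_to w (by omega), PySem.List.slice_from w (by omega), h1, h2]

theorem pvNew_eq (w : List Char) (i : Nat) (c : Char) : pvNew w i c = w.take i ++ c :: w.drop (i + 1) := by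
  have h1 : ((i : Int)).toNat = i := by omega
  have h2 : ((i : Int) + 1).toNat = i + 1 := by omega
  unfold pvNew
  rw [PySem.List.slice_to w (by omega), PySem.List.slice_from w (by omega), h1, h2]
  simp

theorem pvFoldl_two_if {α β : Type} (p : α → Prop) [DecidablePred p] (q : α → Bool) (f : α → β)
    (l : List α) (acc : List β) :
    l.foldl (fun acc c => if p c then (if q c then acc ++ [f c] else acc) else acc) acc
      = acc ++ (l.filter (fun c => decide (p c) && q c)).map f := by
  induction l generalizing acc with
  | nil => simp
  | cons x xs ih =>
    by_cases hp : p x <;> by_cases hq : q x <;>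
      simp [hp, hq, ih]

theorem pvFoldl_one_if {α β : Type} (p : α → Prop) [DecidablePred p] (f : α → β)
    (l : List α) (acc : List β) :
    l.foldl (fun acc c => if p c then acc ++ [f c] else acc) acc
      = acc ++ (l.filter (fun c => decide (p c))).map f := by
  induction l generalizing acc with
  | nil => simp
  | cons x xs ih =>
    by_cases hp : p x <;> simp [hp, ih]

theorem pvPatterns_eq_foldl (words : List String) :
    pvPatterns words
      = List.foldl (fun d q => d.modify q.1 [] (· ++ [q.2])) PySem.Dict.empty (pvPairs words) := by
  unfold pvPatterns pvPairs
  rw [List.foldl_flatMap]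
  refine PySem.List.foldl_congr_mem _ _ _ _ (fun acc word _ => ?_)
  rw [List.foldl_map, List.foldl_filter]

theorem pvPatterns_getD (words : List String) (k : Nat × List Char × List Char) :
    (pvPatterns words).getD k [] = ((pvPairs words).filter (fun q => q.1 == k)).map (fun q => q.2) := by
  rw [pvPatterns_eq_foldl, PySem.Dict.getD_foldl_modify_append]
  simp [pysem]

theorem pvPairs_guard (words : List String) :
    ∀ q ∈ pvPairs words, pvGuard q.2 = true := by
  intro q hq
  unfold pvPairs at hq
  simp only [List.mem_flatMap, List.mem_map, List.mem_filter] at hq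
  obtain ⟨w0, _, p, ⟨_, hg⟩, hEq⟩ := hq
  rw [← hEq]
  exact hg

set_option maxRecDepth 8192 in
theorem pvMem_pairs (words : List String) (w : List Char) (i : Nat) (c : Char) (hi : i < w.length) :
    ((pvKey w i, c) ∈ pvPairs words) ↔ (pvGuard c = true ∧ ∃ v ∈ words, v.toList = pvNew w i c) := by
  have hpre : (w.take i).length = i := by simp [Nat.le_of_lt hi]
  constructor
  · intro h
    unfold pvPairs at h
    rw [List.mem_flatMap] at h
    obtain ⟨w0, hw0, h⟩ := h
    rw [List.mem_map] at h
    obtain ⟨p, hp, hpe⟩ := h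
    obtain ⟨x, j⟩ := p
    rw [List.mem_filter] at hp
    obtain ⟨hpz, hpg⟩ := hp
    have hz := List.mem_zipIdx (xs := w0.toList) (k := 0) hpz
    simp only at hz
    obtain ⟨-, hjlen, hxg⟩ := hz
    rw [pvKey_eq, pvKey_eq, Prod.mk.injEq, Prod.mk.injEq, Prod.mk.injEq] at hpe
    obtain ⟨⟨hji, htk, hdr⟩, hxc⟩ := hpe
    subst hji; subst hxc
    have hjlen' : j < w0.toList.length := by omega
    refine ⟨by simpa using hpg, w0, hw0, ?_⟩
    rw [pvNew_eq]
    calc w0.toList = w0.toList.take j ++ w0.toList.drop j := (List.take_append_drop j w0.toList).symm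
      _ = w0.toList.take j ++ (w0.toList[j] :: w0.toList.drop (j + 1)) := by
            rw [← List.drop_eq_getElem_cons hjlen']
      _ = w.take j ++ (x :: w.drop (j + 1)) := by
            rw [htk, hdr, hxg]
            simp
  · rintro ⟨hg, v, hv, hveq⟩
    rw [pvNew_eq] at hveq
    unfold pvPairs
    rw [List.mem_flatMap]
    refine ⟨v, hv, ?_⟩
    rw [List.mem_map]
    refine ⟨(c, i), ?_, ?_⟩
    · rw [List.mem_filter]
      constructor
      · have hvlen : v.toList.length = i + 1 + (w.drop (i + 1)).length := by
          rw [hveq]; simp [hpre]; omega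
        rw [List.mem_iff_getElem]
        refine ⟨i, by simpa [List.length_zipIdx] using (by omega : i < v.toList.length), ?_⟩
        rw [List.getElem_zipIdx]
        have : v.toList[i]'(by omega) = c := by
          have h1 : (w.take i).length ≤ i := by omega
          simp only [hveq]
          rw [List.getElem_append_right (by omega)]
          simp [hpre]
        rw [this]
        simp
      · simpa using hg
    · rw [pvKey_eq, pvKey_eq]
      have htk : v.toList.take i = w.take i := by
        have h' := List.take_left (l₁ := w.take i) (l₂ := c :: w.drop (i + 1))
        rw [hpre] at h'
        rw [hveq, h']
      have hdr : v.toList.drop (i + 1) = w.drop (i + 1) := by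
        have h' := List.drop_left (l₁ := w.take i ++ [c]) (l₂ := w.drop (i + 1))
        rw [show (w.take i ++ [c]).length = i + 1 by simp [hpre]] at h'
        rw [hveq, List.append_cons, h']
      rw [htk, hdr]

set_option maxRecDepth 8192 in
theorem pvGuard_mem_ascii (c : Char) (h : pvGuard c = true) : c ∈ pvAscii := by
  unfold pvGuard at h
  simp only [Bool.and_eq_true, decide_eq_true_eq] at h
  obtain ⟨h1, h2⟩ := h
  have hb1 : 97 ≤ c.toNat := by simp [Char.le_def] at h1; exact h1
  have hb2 : c.toNat ≤ 122 := by simp [Char.le_def] at h2; exact h2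
  have hc : c = Char.ofNat c.toNat := (Char.ofNat_toNat c).symm
  rw [hc]
  interval_cases h' : c.toNat <;> decide

theorem pvSorted_set (bucket : List Char) (hb : ∀ c ∈ bucket, pvGuard c = true) :
    PySem.List.sorted (PySem.Set.ofList bucket) (fun c => c)
      = pvAscii.filter (fun c => decide (c ∈ bucket)) := by
  have hnd : (pvAscii.filter (fun c => decide (c ∈ bucket))).Nodup :=
    List.Sublist.nodup List.filter_sublist (by decide)
  apply PySem.List.sorted_eq_of_perm_of_pairwise_lt
  · rw [List.perm_ext_iff_of_nodup hnd (PySem.Set.nodup_ofList bucket)]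
    intro a
    simp only [List.mem_filter, PySem.Set.mem_ofList, decide_eq_true_eq]
    constructor
    · exact fun h => h.2
    · exact fun h => ⟨pvGuard_mem_ascii a (hb a h), h⟩
  · exact List.Pairwise.sublist List.filter_sublist (by decide)

theorem pvWordList_eq (words : List String) (w : List Char) (i : Nat) (letter : Char)
    (hi : i < w.length) :
    pvWordListA words w i letter = pvWordListB (pvPatterns words) w i letter := by
  have hg : ∀ c ∈ pvAscii, pvGuard c = true := by
    have hg0 : pvAscii.all pvGuard = true := by rfl
    simpa [List.all_eq_true] using hg0
  have hb : ∀ c ∈ (pvPatterns words).getD (pvKey w i) [], pvGuard c = true := by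
    intro c hcb
    rw [pvPatterns_getD] at hcb
    simp only [List.mem_map, List.mem_filter] at hcb
    obtain ⟨q, ⟨hq, _⟩, rfl⟩ := hcb
    exact pvPairs_guard words q hq
  have hmem : ∀ c, (c ∈ (pvPatterns words).getD (pvKey w i) [])
      ↔ (pvGuard c = true ∧ ∃ v ∈ words, v.toList = pvNew w i c) := by
    intro c
    rw [pvPatterns_getD]
    simp only [List.mem_map, List.mem_filter, beq_iff_eq]
    constructor
    · rintro ⟨q, ⟨hq, hqk⟩, rfl⟩
      rw [← pvMem_pairs words w i q.2 hi, ← hqk, Prod.mk.eta]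
      exact hq
    · intro h
      exact ⟨(pvKey w i, c), ⟨(pvMem_pairs words w i c hi).mpr h, rfl⟩, rfl⟩
  unfold pvWordListA pvWordListB
  rw [pvFoldl_two_if (fun c => c ≠ letter) (fun c => words.any (fun v => v.toList == pvNew w i c))
        (fun c => String.ofList (pvNew w i c)) pvAscii []]
  rw [pvFoldl_one_if (fun c => c ≠ letter) (fun c => String.ofList (pvNew w i c))]
  rw [pvSorted_set _ hb, List.filter_filter]
  simp only [List.nil_append]
  refine congrArg _ (List.filter_congr (fun c hc => ?_))
  cases hcl : decide (c ≠ letter)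
  · simp
  · simp only [Bool.true_and]
    rw [Bool.eq_iff_iff]
    simp only [List.any_eq_true, beq_iff_eq, decide_eq_true_eq]
    rw [hmem c]
    simp [hg c hc]

theorem pvCollect_eq (words : List String) (w : List Char) (l : List (Char × Nat))
    (acc : List (List String)) (hl : ∀ p ∈ l, p.2 < w.length) :
    pvCollectA words w l acc = pvCollectB (pvPatterns words) w l acc := by
  revert acc hl
  induction l with
  | nil => intro acc _; rfl
  | cons p rest ih =>
    intro acc hl
    simp only [pvCollectA, pvCollectB]
    rw [← pvWordList_eq words w p.2 p.1 (hl p (by simp))]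
    split_ifs
    · rfl
    · exact ih _ (fun q hq => hl q (List.mem_cons_of_mem _ hq))

-- ===== VERDICT (by name: the statement is the Claim_ definition above) =====
theorem get_words_with_variants_at_each_position_spec : Claim_equal_get_words_with_variants_at_each_position := by
  intro words _
  unfold Spec_get_words_with_variants_at_each_position
  unfold get_words_with_variants_at_each_position get_words_with_variants_at_each_position_alt
  have hfun : ∀ (word : String),
      pvCollectA words word.toList word.toList.zipIdx []
        = pvCollectB (pvPatterns words) word.toList word.toList.zipIdx [] := by
    intro word
    apply pvCollect_eq
    intro p hp
    obtain ⟨x, j⟩ := p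
    have := List.mem_zipIdx (xs := word.toList) (k := 0) hp
    omega
  show _ = (let pat := pvPatterns words; _)
  simp only []
  congr 1
  exact PySem.List.foldl_congr_mem _ _ _ _ (fun acc word _ => by rw [hfun word])
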